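-- pv_equiv track=rewrite | github.com/nskwak/python | 13_howManySameChar.py | searchDuplicate
-- ===== SOURCE A (Python) =====
-- def searchDuplicate(inputCharArr):
--     lenGth = len(inputCharArr)
--     res = []
--     resdup ={}
--     for inp in inputCharArr:
--         if inp not in res:
--             res.append(inp)
--         else:
--             if inp not in resdup:
--                 tmp = {inp : 1}
--                 resdup.update(tmp)
--             else:
--                 resdup[inp] += 1
--     return resdup
-- ===== SOURCE B (Python) =====
-- def searchDuplicate(inputCharArr):
--     counts = {}
--     for c in inputCharArr:
--         counts[c] = counts.get(c, 0) + 1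
--     resdup = {}
--     seen = {}
--     for c in inputCharArr:
--         seen[c] = seen.get(c, 0) + 1
--         if seen[c] == 2:
--             resdup[c] = counts[c] - 1
--     return resdup
-- ===== Notes on version B (the rewrite author's own statement) =====
-- stated objective: alternative
-- what changed: A incrementally grows a seen-list with linear membership tests and inserts-then-increments dict values; B first builds a complete frequency table in one pass, then in a second pass emits each character exactly once, at its second occurrence, with its final surplus count already known.
import Mathlib
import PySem

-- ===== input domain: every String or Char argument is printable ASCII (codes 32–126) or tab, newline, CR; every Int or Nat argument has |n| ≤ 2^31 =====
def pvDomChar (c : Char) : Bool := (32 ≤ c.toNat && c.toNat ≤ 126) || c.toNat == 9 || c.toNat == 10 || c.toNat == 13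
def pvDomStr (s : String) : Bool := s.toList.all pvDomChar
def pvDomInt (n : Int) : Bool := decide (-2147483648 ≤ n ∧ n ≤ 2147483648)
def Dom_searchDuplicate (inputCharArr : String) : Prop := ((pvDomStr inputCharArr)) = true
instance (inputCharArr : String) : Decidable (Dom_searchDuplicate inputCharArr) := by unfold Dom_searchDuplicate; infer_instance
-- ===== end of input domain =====

-- B replaces A's growing seen-list (linear membership test) and insert-then-increment dict updates by
-- two passes: a full frequency count first, then one emission per duplicate character at its second
-- occurrence with the final surplus already known (objective: alternative, same asymptotic cost here).

-- ===== PORT A =====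
-- one loop iteration of A: membership in the seen-list `res`, then insert-or-increment in `resdup`
def stepA (st : List Char × PySem.Dict Char Int) (inp : Char) : List Char × PySem.Dict Char Int :=
  if inp ∉ st.1 then (st.1 ++ [inp], st.2)
  else if st.2.contains inp = false then (st.1, st.2.insert inp 1)
  else (st.1, st.2.insert inp (st.2.getD inp 0 + 1))   -- resdup[inp] += 1 (key present in this branch)

def searchDuplicate (inputCharArr : String) : List (String × Int) :=
  ((inputCharArr.toList.foldl stepA ([], PySem.Dict.empty)).2).items.map
    (fun p => (p.1.toString, p.2))

-- ===== PORT B =====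
-- one loop iteration of B's second pass: bump `seen`, emit at the second occurrence
def stepB (counts : PySem.Dict Char Int) (st : PySem.Dict Char Int × PySem.Dict Char Int)
    (c : Char) : PySem.Dict Char Int × PySem.Dict Char Int :=
  let seen := st.1.insert c (st.1.getD c 0 + 1)
  if seen.getD c 0 = 2 then (seen, st.2.insert c (counts.getD c 0 - 1)) else (seen, st.2)

def searchDuplicate_alt (inputCharArr : String) : List (String × Int) :=
  ((inputCharArr.toList.foldl
      (stepB (inputCharArr.toList.foldl (fun d c => d.insert c (d.getD c 0 + 1)) PySem.Dict.empty))
      (PySem.Dict.empty, PySem.Dict.empty)).2).items.map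
    (fun p => (p.1.toString, p.2))

-- ===== PRECONDITION & SPEC =====
def Spec_searchDuplicate (inputCharArr : String) (out : List (String × Int)) : Prop := out = searchDuplicate_alt inputCharArr
instance (inputCharArr : String) (out : List (String × Int)) : Decidable (Spec_searchDuplicate inputCharArr out) := by unfold Spec_searchDuplicate; infer_instance

-- ===== CLAIM (what is proved, stated in full; the proofs are below) =====
def Claim_equal_searchDuplicate : Prop := ∀ (inputCharArr : String), Dom_searchDuplicate inputCharArr → Spec_searchDuplicate inputCharArr (searchDuplicate inputCharArr)

-- ===== LEMMAS AND PROOFS =====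

-- the characters of `rest` that reach their SECOND overall occurrence (relative to prefix `pref`)
-- inside `rest`, in that order: the common key order of both result dicts
def skAux (pref : List Char) : List Char → List Char
  | [] => []
  | c :: rest => if pref.count c = 1 then c :: skAux (pref ++ [c]) rest else skAux (pref ++ [c]) rest

lemma mem_skAux (c : Char) : ∀ (rest pref : List Char),
    c ∈ skAux pref rest ↔ 2 ≤ (pref ++ rest).count c ∧ pref.count c ≤ 1 := by
  intro rest
  induction rest with
  | nil => intro pref; simp [skAux]; omega
  | cons x r ih =>
    intro pref
    have hsplit : pref ++ x :: r = (pref ++ [x]) ++ r := by simp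
    simp only [skAux]
    split
    · rename_i h
      rw [List.mem_cons, ih, hsplit]
      by_cases hcx : c = x
      · subst hcx
        simp only [List.count_append, List.count_cons, List.count_nil, beq_self_eq_true,
          if_true, true_or, true_iff]
        constructor <;> omega
      · have hxc : x ≠ c := fun h' => hcx h'.symm
        simp only [hcx, false_or, List.count_append, List.count_cons, List.count_nil,
          beq_iff_eq, hxc, if_false]
        omega
    · rename_i h
      rw [ih, hsplit]
      by_cases hcx : c = x
      · subst hcx
        simp only [List.count_append, List.count_cons, List.count_nil, beq_self_eq_true,
          if_true]
        omega
      · have hxc : x ≠ c := fun h' => hcx h'.symm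
        simp only [List.count_append, List.count_cons, List.count_nil, beq_iff_eq, hxc,
          if_false]
        omega

lemma skAux_snoc (c : Char) : ∀ (rest pref : List Char),
    skAux pref (rest ++ [c]) =
      skAux pref rest ++ (if (pref ++ rest).count c = 1 then [c] else []) := by
  intro rest
  induction rest with
  | nil => intro pref; simp [skAux]
  | cons x r ih =>
    intro pref
    simp only [List.cons_append, skAux]
    split
    · rw [ih (pref ++ [x])]
      simp [List.count_append]
    · rw [ih (pref ++ [x])]
      simp [List.count_append]

lemma nodup_skAux : ∀ (rest pref : List Char), (skAux pref rest).Nodup := by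
  intro rest
  induction rest with
  | nil => intro pref; simp [skAux]
  | cons x r ih =>
    intro pref
    simp only [skAux]
    split
    · refine List.nodup_cons.2 ⟨?_, ih _⟩
      rw [mem_skAux]
      simp [List.count_append]
      omega
    · exact ih _

lemma mem_skAux_nil (c : Char) (p : List Char) : c ∈ skAux [] p ↔ 2 ≤ p.count c := by
  rw [mem_skAux]; simp

-- canonical value of A's resdup after processing prefix p
def aDict (p : List Char) : PySem.Dict Char Int :=
  PySem.Dict.mk ((skAux [] p).map (fun c => (c, (p.count c : Int) - 1)))

-- canonical value of B's resdup after processing prefix p (values from the fixed full-count dict)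
def bDict (counts : PySem.Dict Char Int) (p : List Char) : PySem.Dict Char Int :=
  PySem.Dict.mk ((skAux [] p).map (fun c => (c, counts.getD c 0 - 1)))

lemma keys_aDict (p : List Char) : (aDict p).keys = skAux [] p := by
  simp [aDict, PySem.Dict.keys, List.map_map, Function.comp_def]

lemma nodup_keys_aDict (p : List Char) : (aDict p).keys.Nodup := by
  rw [keys_aDict]; exact nodup_skAux _ _

lemma contains_aDict (p : List Char) (c : Char) :
    (aDict p).contains c = decide (2 ≤ p.count c) := by
  rw [PySem.Dict.contains_eq_decide_mem_keys, keys_aDict]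
  simp [mem_skAux_nil]

lemma getD_aDict (p : List Char) (c : Char) (h : c ∈ skAux [] p) :
    (aDict p).getD c 0 = (p.count c : Int) - 1 := by
  have hm : (c, (p.count c : Int) - 1) ∈ (aDict p).items := by
    simp only [aDict]
    exact List.mem_map.2 ⟨c, h, rfl⟩
  exact PySem.Dict.getD_of_mem_items _ hm (nodup_keys_aDict p) 0

lemma foldA_eq : ∀ (p : List Char), ∃ res : List Char,
    (∀ c, c ∈ res ↔ c ∈ p) ∧ p.foldl stepA ([], PySem.Dict.empty) = (res, aDict p) := by
  intro p
  induction p using List.reverseRecOn with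
  | nil =>
    refine ⟨[], by simp, ?_⟩
    simp only [List.foldl_nil, aDict, skAux, List.map_nil]
    rfl
  | append_singleton p c ih =>
    obtain ⟨res, hmem, hfold⟩ := ih
    rw [List.foldl_append, hfold, List.foldl_cons, List.foldl_nil]
    by_cases hc : c ∈ p
    · have hin : ¬ c ∉ res := not_not_intro ((hmem c).2 hc)
      by_cases h2 : 2 ≤ p.count c
      · -- third branch: increment the existing entry
        have hcont : (aDict p).contains c = true := by
          rw [contains_aDict]; simpa using h2
        have hmemk : c ∈ skAux [] p := (mem_skAux_nil c p).2 h2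
        refine ⟨res, fun x => by rw [hmem]; simp [List.mem_append]; exact fun h => h.symm ▸ hc, ?_⟩
        simp only [stepA, if_neg hin, hcont, Bool.true_eq_false]
        rw [if_neg (fun h => h)]
        congr 1
        apply PySem.Dict.ext
        rw [PySem.Dict.items_insert_of_contains _ _ hcont, getD_aDict p c hmemk]
        simp only [aDict]
        rw [skAux_snoc, List.nil_append, if_neg (by omega), List.append_nil, List.map_map]
        apply List.map_congr_left
        intro x hx
        by_cases hxc : x = c
        · subst hxc
          simp only [Function.comp_def, beq_self_eq_true, if_true, Prod.mk.injEq, true_and]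
          have hcnt : (p ++ [x]).count x = p.count x + 1 := by
            simp [List.count_append]
          rw [hcnt]
          push_cast
          ring
        · have hxc' : (x == c) = false := by simp [hxc]
          have hcx : c ≠ x := fun h => hxc h.symm
          simp only [Function.comp_def, hxc', Bool.false_eq_true, if_false, Prod.mk.injEq,
            true_and]
          have hcnt : (p ++ [c]).count x = p.count x := by
            simp [List.count_append, hcx]
          rw [hcnt]
      · -- second branch: fresh key, value 1
        have h1 : p.count c = 1 := by
          have := List.count_pos_iff.2 hc; omega
        have hcont : (aDict p).contains c = false := by
          rw [contains_aDict]; simpa using (by omega : ¬ 2 ≤ p.count c)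
        refine ⟨res, fun x => by rw [hmem]; simp [List.mem_append]; exact fun h => h.symm ▸ hc, ?_⟩
        simp only [stepA, if_neg hin, hcont]
        rw [if_pos trivial]
        congr 1
        apply PySem.Dict.ext
        rw [PySem.Dict.items_insert_of_not_contains _ _ hcont]
        simp only [aDict]
        rw [skAux_snoc, List.nil_append, if_pos h1, List.map_append]
        congr 1
        · apply List.map_congr_left
          intro x hx
          have hxc : x ≠ c := by
            intro h; subst h
            have := (mem_skAux_nil x p).1 hx; omega
          have hcx : c ≠ x := fun h => hxc h.symm
          have hcnt : (p ++ [c]).count x = p.count x := by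
            simp [List.count_append, hcx]
          rw [hcnt]
        · have hcnt : (p ++ [c]).count c = 2 := by
            simp [List.count_append, h1]
          simp [h1]
    · -- first branch: unseen character, resdup untouched
      have hnin : c ∉ res := fun h => hc ((hmem c).1 h)
      refine ⟨res ++ [c], fun x => by simp [hmem], ?_⟩
      simp only [stepA, if_pos hnin]
      congr 1
      apply PySem.Dict.ext
      simp only [aDict]
      rw [skAux_snoc, List.nil_append,
        if_neg (by simp [List.count_eq_zero_of_not_mem hc]), List.append_nil]
      apply List.map_congr_left
      intro x hx
      have hxc : x ≠ c := by
        intro h; subst h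
        have := (mem_skAux_nil x p).1 hx
        simp [List.count_eq_zero_of_not_mem hc] at this
      have hcx : c ≠ x := fun h => hxc h.symm
      have hcnt : (p ++ [c]).count x = p.count x := by
        simp [List.count_append, hcx]
      rw [hcnt]

lemma foldB_eq (counts : PySem.Dict Char Int) : ∀ (p : List Char),
    p.foldl (stepB counts) (PySem.Dict.empty, PySem.Dict.empty) =
      (p.foldl (fun d c => d.insert c (d.getD c 0 + 1)) PySem.Dict.empty, bDict counts p) := by
  intro p
  induction p using List.reverseRecOn with
  | nil =>
    simp only [List.foldl_nil, bDict, skAux, List.map_nil]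
    rfl
  | append_singleton p c ih =>
    rw [List.foldl_append, ih, List.foldl_append, List.foldl_cons, List.foldl_nil,
      List.foldl_cons, List.foldl_nil]
    have hseen : (p.foldl (fun d c => d.insert c (d.getD c 0 + 1)) PySem.Dict.empty).getD c 0
        = (p.count c : Int) := by
      rw [PySem.Dict.getD_foldl_insert_add_one]
      simp
    simp only [stepB]
    rw [PySem.Dict.getD_insert_self, hseen]
    by_cases h1 : p.count c = 1
    · rw [if_pos (by rw [h1]; norm_num)]
      congr 1
      apply PySem.Dict.ext
      have hkeys : (bDict counts p).keys = skAux [] p := by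
        simp [bDict, PySem.Dict.keys, List.map_map, Function.comp_def]
      have hcont : (bDict counts p).contains c = false := by
        rw [PySem.Dict.contains_eq_decide_mem_keys, hkeys]
        simp [mem_skAux_nil, h1]
      rw [PySem.Dict.items_insert_of_not_contains _ _ hcont]
      simp only [bDict]
      rw [skAux_snoc, List.nil_append, if_pos h1, List.map_append]
      simp
    · rw [if_neg (by intro h; apply h1; omega)]
      congr 1
      simp only [bDict]
      rw [skAux_snoc, List.nil_append, if_neg h1, List.append_nil]

-- ===== VERDICT (by name: the statement is the Claim_ definition above) =====
theorem searchDuplicate_spec : Claim_equal_searchDuplicate := by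
  intro s _
  unfold Spec_searchDuplicate searchDuplicate searchDuplicate_alt
  obtain ⟨res, _, hA⟩ := foldA_eq s.toList
  rw [hA, foldB_eq]
  simp only [aDict, bDict, List.map_map]
  apply List.map_congr_left
  intro c hc
  have hcount : (s.toList.foldl (fun d c => d.insert c (d.getD c 0 + 1))
      PySem.Dict.empty).getD c 0 = (s.toList.count c : Int) := by
    rw [PySem.Dict.getD_foldl_insert_add_one]; simp
  simp [hcount]
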